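-- pv_equiv track=rewrite | github.com/juryokun/til | rust/experiment/ex00/example/bitonic-sorter/py-src/bitonic_sorter.py | _sub_sort
-- ===== SOURCE A (Python) =====
-- def _sub_sort(x, up):
--     """
--     バイトニックにソートされたリストxの前半と後半を、upで指定された向きに、
--     比較、交換し、前半と後半それぞれについて再帰的にサブソートを適用する
--     """
--     if len(x) == 1:
--         return x
--     else:
--         # ステップ2a
--         # 要素数nのバイトニック列の要素をn/2要素おきに比較して
--         # upで指定された順序（昇順または降順）になるよう交換する
--         _compare_and_swap(x, up)
--
--         # ステップ2b
--         # データ列を半分に分割し、それぞれに対して_sub_sortを繰り返す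
--         mid_point = len(x) // 2
--         first = _sub_sort(x[:mid_point], up)
--         second = _sub_sort(x[mid_point:], up)
--
--         # ステップ2c
--         # 2分割したデータ列を1つに結合する
--         return first + second
--
-- def _compare_and_swap(x, up):
--     """
--     要素数nのバイトニック列の要素をn/2要素おきに比較して、upで指定された
--     順序（昇順または降順）になるよう交換する（ステップ2a）
--     """
--     mid_point = len(x) // 2
--     for i in range(mid_point):
--         if ((x[i] > x[mid_point + i])) == up:
--         # if ((mid_point+i <= len(x)) and (x[i] > x[mid_point + i])) == up:
--             # 要素を交換する
--             x[i], x[mid_point + i] = x[mid_point + i], x[i]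
-- ===== SOURCE B (Python) =====
-- def _sub_sort(x, up):
--     # Explicit-stack (iterative) version; builds halves with min/max zips instead
--     # of in-place swaps; unlike A it does not mutate the caller's list.
--     out = []
--     stack = [list(x)]
--     while stack:
--         seg = stack.pop()
--         if len(seg) == 1:
--             out.append(seg[0])
--             continue
--         m = len(seg) // 2
--         lo, hi = seg[:m], seg[m:]
--         if up:
--             first = [min(p, q) for p, q in zip(lo, hi)]
--             second = [max(p, q) for p, q in zip(lo, hi)] + hi[m:]
--         else:
--             first = [max(p, q) for p, q in zip(lo, hi)]
--             second = [min(p, q) for p, q in zip(lo, hi)] + hi[m:]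
--         stack.append(second)
--         stack.append(first)
--     return out
-- ===== Notes on version B (the rewrite author's own statement) =====
-- stated objective: alternative
-- what changed: A's recursion with an in-place swap loop is replaced by an explicit-stack iteration that builds each half directly with min/max over zipped half-pairs (and B does not mutate its argument); Pre_ excludes only the empty list, on which A raises RecursionError.
import Mathlib
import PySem

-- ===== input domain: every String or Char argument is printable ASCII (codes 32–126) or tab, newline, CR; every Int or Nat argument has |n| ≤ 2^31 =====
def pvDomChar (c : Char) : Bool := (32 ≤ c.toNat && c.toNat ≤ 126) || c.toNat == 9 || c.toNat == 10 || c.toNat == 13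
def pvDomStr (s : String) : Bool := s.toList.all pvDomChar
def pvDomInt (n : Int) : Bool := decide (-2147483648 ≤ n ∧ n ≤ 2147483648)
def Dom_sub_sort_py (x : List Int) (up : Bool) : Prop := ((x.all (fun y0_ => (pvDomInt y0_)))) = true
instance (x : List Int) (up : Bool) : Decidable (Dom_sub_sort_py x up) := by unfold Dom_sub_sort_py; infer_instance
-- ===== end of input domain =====

-- B replaces A's recursion + in-place swap loop by an explicit stack with min/max zip
-- construction of the two halves (objective: alternative). Python A mutates its argument in
-- place (the first compare-and-swap pass); B does not — the equivalence proved is about the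
-- RETURN value only.

-- ===== PORT A =====
-- loop body of _compare_and_swap; indices i and m+i are always in range (i < m = len//2),
-- so List.getD is exact for Python's x[i]
def casStep (up : Bool) (m : Nat) (acc : List Int) (i : Nat) : List Int :=
  if (decide (acc.getD i 0 > acc.getD (m + i) 0)) == up then
    (acc.set i (acc.getD (m + i) 0)).set (m + i) (acc.getD i 0)
  else acc

-- _compare_and_swap: the for-loop over range(mid_point) as a foldl
def compareAndSwap (x : List Int) (up : Bool) : List Int :=
  (List.range (x.length / 2)).foldl (casStep up (x.length / 2)) x

-- length preservation, needed for sub_sort_py's termination (cited in decreasing_by)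
theorem casStep_length (up : Bool) (m : Nat) (acc : List Int) (i : Nat) :
    (casStep up m acc i).length = acc.length := by
  unfold casStep; split <;> simp

theorem foldl_casStep_length (up : Bool) (m : Nat) :
    ∀ (l : List Nat) (acc : List Int), (l.foldl (casStep up m) acc).length = acc.length := by
  intro l
  induction l with
  | nil => intro acc; rfl
  | cons i t ih => intro acc; rw [List.foldl_cons, ih, casStep_length]

theorem compareAndSwap_length (x : List Int) (up : Bool) :
    (compareAndSwap x up).length = x.length :=
  foldl_casStep_length up (x.length / 2) (List.range (x.length / 2)) x

-- _sub_sort; Python's branch is `len(x) == 1`: on [] the Python recurses forever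
-- (RecursionError, excluded by Pre_), the `≤ 1` guard only makes the port total there
-- cited in sub_sort_py's decreasing_by
theorem sub_sort_take_dec (x : List Int) (up : Bool) (h : ¬ x.length ≤ 1) :
    ((compareAndSwap x up).take ((compareAndSwap x up).length / 2)).length < x.length := by
  simp only [List.length_take, compareAndSwap_length]; omega
theorem sub_sort_drop_dec (x : List Int) (up : Bool) (h : ¬ x.length ≤ 1) :
    ((compareAndSwap x up).drop ((compareAndSwap x up).length / 2)).length < x.length := by
  simp only [List.length_drop, compareAndSwap_length]; omega

def sub_sort_py (x : List Int) (up : Bool) : List Int :=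
  if x.length ≤ 1 then x
  else
    let y := compareAndSwap x up
    let m := y.length / 2
    sub_sort_py (y.take m) up ++ sub_sort_py (y.drop m) up
termination_by x.length
decreasing_by
  · exact sub_sort_take_dec x up (by assumption)
  · exact sub_sort_drop_dec x up (by assumption)

-- ===== PORT B =====
-- the while-loop of B: pop a segment, emit it if it is a single element, otherwise
-- push the two min/max-combined halves; `fuel` only makes the loop total (a totality
-- guard: sub_sort_py_alt supplies more fuel than the loop ever consumes)
def bLoop (up : Bool) (fuel : Nat) (stack : List (List Int)) (out : List Int) : List Int :=
  match fuel, stack with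
  | _, [] => out
  | 0, _ => out
  | fuel + 1, seg :: rest =>
    if seg.length = 0 then
      -- unreachable from sub_sort_py_alt's initial stack (segments stay nonempty)
      bLoop up fuel rest out
    else if seg.length = 1 then
      bLoop up fuel rest (out ++ [seg.getD 0 0])
    else
      let m := seg.length / 2
      let lo := seg.take m
      let hi := seg.drop m
      let first := if up then (lo.zip hi).map (fun p => min p.1 p.2)
                   else (lo.zip hi).map (fun p => max p.1 p.2)
      let second := (if up then (lo.zip hi).map (fun p => max p.1 p.2)
                     else (lo.zip hi).map (fun p => min p.1 p.2)) ++ hi.drop m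
      bLoop up fuel (first :: second :: rest) out

def sub_sort_py_alt (x : List Int) (up : Bool) : List Int := bLoop up (2 * x.length) [x] []

-- ===== PRECONDITION & SPEC =====
-- Pre_ excludes only the empty list, on which Python A recurses forever (RecursionError)
def Pre_sub_sort_py (x : List Int) (up : Bool) : Prop := x ≠ []
instance (x : List Int) (up : Bool) : Decidable (Pre_sub_sort_py x up) := by
  unfold Pre_sub_sort_py; infer_instance

def pvWitness_sub_sort_py : List Int × Bool := ([1, 3, 2], true)

def Spec_sub_sort_py (x : List Int) (up : Bool) (out : List Int) : Prop :=
  out = sub_sort_py_alt x up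
instance (x : List Int) (up : Bool) (out : List Int) : Decidable (Spec_sub_sort_py x up out) := by
  unfold Spec_sub_sort_py; infer_instance

-- ===== CLAIM (what is proved, stated in full; the proofs are below) =====
def Claim_equal_sub_sort_py : Prop := ∀ (x : List Int) (up : Bool),
  Dom_sub_sort_py x up → Pre_sub_sort_py x up → Spec_sub_sort_py x up (sub_sort_py x up)

-- ===== LEMMAS AND PROOFS =====

-- fuel a segment consumes in bLoop (proof-side bookkeeping only)
def bW (s : List Int) : Nat := if s.length = 0 then 1 else 2 * s.length - 1

theorem bLoop_nil (up : Bool) (fuel : Nat) (out : List Int) :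
    bLoop up fuel [] out = out := by
  cases fuel <;> rfl

-- the value A's swap leaves in the low half / high half
def fsel : Bool → Int → Int → Int
  | true, a, b => min a b
  | false, a, b => max a b
def gsel : Bool → Int → Int → Int
  | true, a, b => max a b
  | false, a, b => min a b

theorem getElem?_eq_some_getD (l : List Int) (j : Nat) (h : j < l.length) :
    l[j]? = some (l.getD j 0) := by
  rw [List.getElem?_eq_getElem h, List.getD_eq_getElem?_getD, List.getElem?_eq_getElem h]
  rfl

-- one step of the swap loop, at the level of getElem?
theorem casStep_getElem? (up : Bool) (m : Nat) (acc : List Int) (i j : Nat) :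
    (casStep up m acc i)[j]? =
      if ((decide (acc.getD i 0 > acc.getD (m + i) 0)) == up) = true then
        ((acc.set i (acc.getD (m + i) 0)).set (m + i) (acc.getD i 0))[j]?
      else acc[j]? := by
  unfold casStep; split <;> rfl

-- loop invariant of _compare_and_swap: after k iterations the first k and the
-- [m, m+k) slots carry the min/max of the paired originals, the rest is untouched
theorem cas_fold_getElem? (up : Bool) (x : List Int) (m : Nat) (hm : m = x.length / 2)
    (k : Nat) :
    k ≤ m → ∀ (j : Nat),
    ((List.range k).foldl (casStep up m) x)[j]? =
      if j < k then some (fsel up (x.getD j 0) (x.getD (m + j) 0))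
      else if m ≤ j ∧ j < m + k then some (gsel up (x.getD (j - m) 0) (x.getD j 0))
      else x[j]? := by
  induction k with
  | zero => intro _ j; simp
  | succ k ih =>
    intro hk j
    have hk' : k ≤ m := Nat.le_of_succ_le hk
    have hkm : k < m := hk
    have hkx : k < x.length := by omega
    have hmkx : m + k < x.length := by omega
    rw [List.range_succ, List.foldl_append, List.foldl_cons, List.foldl_nil]
    have hylen : ((List.range k).foldl (casStep up m) x).length = x.length :=
      foldl_casStep_length up m _ x
    have hyk : ((List.range k).foldl (casStep up m) x)[k]? = x[k]? := by
      rw [ih hk' k, if_neg (lt_irrefl k), if_neg (by omega)]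
    have hymk : ((List.range k).foldl (casStep up m) x)[m + k]? = x[m + k]? := by
      rw [ih hk' (m + k), if_neg (by omega), if_neg (by omega)]
    have hgk : ((List.range k).foldl (casStep up m) x).getD k 0 = x.getD k 0 := by
      rw [List.getD_eq_getElem?_getD, hyk, List.getD_eq_getElem?_getD]
    have hgmk : ((List.range k).foldl (casStep up m) x).getD (m + k) 0 = x.getD (m + k) 0 := by
      rw [List.getD_eq_getElem?_getD, hymk, List.getD_eq_getElem?_getD]
    have hxk? : x[k]? = some (x.getD k 0) := getElem?_eq_some_getD x k hkx
    have hxmk? : x[m + k]? = some (x.getD (m + k) 0) := getElem?_eq_some_getD x (m + k) hmkx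
    rw [casStep_getElem?, hgk, hgmk]
    by_cases hc : ((decide (x.getD k 0 > x.getD (m + k) 0)) == up) = true
    · rw [if_pos hc, List.getElem?_set, List.getElem?_set, List.length_set, hylen, ih hk' j]
      rcases up <;> simp at hc <;>
        rw [← List.getD_eq_getElem?_getD, ← List.getD_eq_getElem?_getD] at hc <;>
        split_ifs <;>
          first
            | rfl
            | omega
            | (subst_vars; simp only [fsel, gsel, Option.some.injEq,
                 Nat.add_sub_cancel_left]; omega)
            | (have hj : j = k := by omega
               subst hj
               rw [hxk?]
               simp only [fsel, gsel, Option.some.injEq]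
               omega)
            | (have hj : j = m + k := by omega
               subst hj
               rw [hxmk?]
               simp only [fsel, gsel, Option.some.injEq, Nat.add_sub_cancel_left]
               omega)
    · rw [if_neg hc, ih hk' j]
      rcases up <;> simp at hc <;>
        rw [← List.getD_eq_getElem?_getD, ← List.getD_eq_getElem?_getD] at hc <;>
        split_ifs <;>
          first
            | rfl
            | omega
            | (subst_vars; simp only [fsel, gsel, Option.some.injEq,
                 Nat.add_sub_cancel_left]; omega)
            | (have hj : j = k := by omega
               subst hj
               rw [hxk?]
               simp only [fsel, gsel, Option.some.injEq]
               omega)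
            | (have hj : j = m + k := by omega
               subst hj
               rw [hxmk?]
               simp only [fsel, gsel, Option.some.injEq, Nat.add_sub_cancel_left]
               omega)

theorem zip_take_drop_getElem? (x : List Int) (m j : Nat) (hm : m = x.length / 2)
    (hj : j < m) :
    ((x.take m).zip (x.drop m))[j]? = some (x.getD j 0, x.getD (m + j) 0) := by
  have h1 : x[j]? = some (x.getD j 0) := getElem?_eq_some_getD x j (by omega)
  have h2 : x[m + j]? = some (x.getD (m + j) 0) := getElem?_eq_some_getD x (m + j) (by omega)
  rw [List.zip_eq_zipWith, List.getElem?_zipWith, List.getElem?_take, if_pos hj,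
    List.getElem?_drop, h1, h2]

theorem cas_eq (x : List Int) (up : Bool) :
    compareAndSwap x up =
      (if up then ((x.take (x.length / 2)).zip (x.drop (x.length / 2))).map (fun p => min p.1 p.2)
       else ((x.take (x.length / 2)).zip (x.drop (x.length / 2))).map (fun p => max p.1 p.2))
      ++ ((if up then ((x.take (x.length / 2)).zip (x.drop (x.length / 2))).map (fun p => max p.1 p.2)
           else ((x.take (x.length / 2)).zip (x.drop (x.length / 2))).map (fun p => min p.1 p.2))
          ++ (x.drop (x.length / 2)).drop (x.length / 2)) := by
  apply List.ext_getElem?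
  intro j
  have h := cas_fold_getElem? up x (x.length / 2) rfl (x.length / 2) (le_refl _) j
  have hzlen : ((x.take (x.length / 2)).zip (x.drop (x.length / 2))).length = x.length / 2 := by
    simp [List.length_zip]; omega
  unfold compareAndSwap
  rw [h]
  rcases Nat.lt_or_ge j (x.length / 2) with hj | hj
  · rw [if_pos hj]
    rcases up <;>
      simp only [Bool.false_eq_true, ite_false, ite_true] <;>
      rw [List.getElem?_append_left (by rw [List.length_map, hzlen]; exact hj),
        List.getElem?_map, zip_take_drop_getElem? x (x.length / 2) j rfl hj] <;>
      simp [fsel]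
  · rw [if_neg (by omega)]
    rcases Nat.lt_or_ge j (x.length / 2 + x.length / 2) with hj2 | hj2
    · rw [if_pos (by omega)]
      rcases up <;>
        simp only [Bool.false_eq_true, ite_false, ite_true] <;>
        rw [List.getElem?_append_right (by rw [List.length_map, hzlen]; exact hj),
          List.length_map, hzlen,
          List.getElem?_append_left (by rw [List.length_map, hzlen]; omega),
          List.getElem?_map, zip_take_drop_getElem? x (x.length / 2) (j - x.length / 2) rfl
            (by omega)] <;>
        (have : x.length / 2 + (j - x.length / 2) = j := by omega) <;>
        rw [this] <;> simp [gsel]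
    · rw [if_neg (by omega)]
      rcases up <;>
        simp only [Bool.false_eq_true, ite_false, ite_true] <;>
        rw [List.getElem?_append_right (by rw [List.length_map, hzlen]; exact hj),
          List.length_map, hzlen,
          List.getElem?_append_right (by rw [List.length_map, hzlen]; omega),
          List.length_map, hzlen, List.getElem?_drop, List.getElem?_drop] <;>
        congr 1 <;> omega

-- popping a nonempty segment appends exactly A's result for that segment
theorem bLoop_cons : ∀ (n : Nat) (seg : List Int), seg.length ≤ n → seg ≠ [] →
    ∀ (fuel : Nat) (rest : List (List Int)) (out : List Int) (up : Bool), bW seg ≤ fuel →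
    bLoop up fuel (seg :: rest) out =
      bLoop up (fuel - bW seg) rest (out ++ sub_sort_py seg up) := by
  intro n
  induction n with
  | zero =>
    intro seg hlen hne
    cases seg with
    | nil => exact absurd rfl hne
    | cons a t => simp at hlen
  | succ n ih =>
    intro seg hlen hne fuel rest out up hfuel
    have hpos : 0 < seg.length := List.length_pos_of_ne_nil hne
    have hbw1 : 1 ≤ bW seg := by unfold bW; split <;> omega
    obtain ⟨f, rfl⟩ : ∃ f, fuel = f + 1 := ⟨fuel - 1, by omega⟩
    by_cases h1 : seg.length = 1
    · obtain ⟨a, rfl⟩ := List.length_eq_one_iff.mp h1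
      rw [bLoop, if_neg (by simp), if_pos (by simp), sub_sort_py, if_pos (by simp)]
      have hb : bW [a] = 1 := by rfl
      rw [hb]
      rfl
    · have h2 : 2 ≤ seg.length := by omega
      have hbw : bW seg = 2 * seg.length - 1 := by unfold bW; rw [if_neg (by omega)]
      rw [bLoop, if_neg (by omega), if_neg h1]
      have hcl : (compareAndSwap seg up).length = seg.length := compareAndSwap_length seg up
      have hss : sub_sort_py seg up =
          sub_sort_py ((compareAndSwap seg up).take (seg.length / 2)) up ++
          sub_sort_py ((compareAndSwap seg up).drop (seg.length / 2)) up := by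
        rw [sub_sort_py, if_neg (by omega)]
        simp only [hcl]
      have hzlen : ((seg.take (seg.length / 2)).zip (seg.drop (seg.length / 2))).length
          = seg.length / 2 := by
        simp [List.length_zip]; omega
      have hflen : (if up then ((seg.take (seg.length / 2)).zip
              (seg.drop (seg.length / 2))).map (fun p => min p.1 p.2)
            else ((seg.take (seg.length / 2)).zip
              (seg.drop (seg.length / 2))).map (fun p => max p.1 p.2)).length
          = seg.length / 2 := by
        rcases up <;> simp [hzlen]
      have hslen : ((if up then ((seg.take (seg.length / 2)).zip
              (seg.drop (seg.length / 2))).map (fun p => max p.1 p.2)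
            else ((seg.take (seg.length / 2)).zip
              (seg.drop (seg.length / 2))).map (fun p => min p.1 p.2)) ++
            (seg.drop (seg.length / 2)).drop (seg.length / 2)).length
          = seg.length - seg.length / 2 := by
        rcases up <;> simp [hzlen] <;> omega
      have htake : (compareAndSwap seg up).take (seg.length / 2) =
          (if up then ((seg.take (seg.length / 2)).zip
              (seg.drop (seg.length / 2))).map (fun p => min p.1 p.2)
            else ((seg.take (seg.length / 2)).zip
              (seg.drop (seg.length / 2))).map (fun p => max p.1 p.2)) := by
        rw [cas_eq seg up, List.take_left' hflen]
      have hdrop : (compareAndSwap seg up).drop (seg.length / 2) =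
          ((if up then ((seg.take (seg.length / 2)).zip
              (seg.drop (seg.length / 2))).map (fun p => max p.1 p.2)
            else ((seg.take (seg.length / 2)).zip
              (seg.drop (seg.length / 2))).map (fun p => min p.1 p.2)) ++
            (seg.drop (seg.length / 2)).drop (seg.length / 2)) := by
        rw [cas_eq seg up, List.drop_left' hflen]
      have hbwf : bW (if up then ((seg.take (seg.length / 2)).zip
              (seg.drop (seg.length / 2))).map (fun p => min p.1 p.2)
            else ((seg.take (seg.length / 2)).zip
              (seg.drop (seg.length / 2))).map (fun p => max p.1 p.2))
          = 2 * (seg.length / 2) - 1 := by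
        unfold bW
        rw [hflen, if_neg (by omega)]
      have hbws : bW ((if up then ((seg.take (seg.length / 2)).zip
              (seg.drop (seg.length / 2))).map (fun p => max p.1 p.2)
            else ((seg.take (seg.length / 2)).zip
              (seg.drop (seg.length / 2))).map (fun p => min p.1 p.2)) ++
            (seg.drop (seg.length / 2)).drop (seg.length / 2))
          = 2 * (seg.length - seg.length / 2) - 1 := by
        unfold bW
        rw [hslen, if_neg (by omega)]
      rw [ih _ (by omega) (by
            intro hnil
            rw [hnil] at hflen
            simp at hflen
            omega)
          f (_ :: rest) out up (by rw [hbwf]; omega),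
        ih _ (by
            rw [hslen]
            omega) (by
            intro hnil
            rw [hnil] at hslen
            simp at hslen
            omega)
          (f - _) rest (out ++ _) up (by rw [hbwf, hbws]; omega),
        List.append_assoc, hss, htake, hdrop]
      have hfe : f - bW (if up then ((seg.take (seg.length / 2)).zip
              (seg.drop (seg.length / 2))).map (fun p => min p.1 p.2)
            else ((seg.take (seg.length / 2)).zip
              (seg.drop (seg.length / 2))).map (fun p => max p.1 p.2))
          - bW ((if up then ((seg.take (seg.length / 2)).zip
              (seg.drop (seg.length / 2))).map (fun p => max p.1 p.2)
            else ((seg.take (seg.length / 2)).zip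
              (seg.drop (seg.length / 2))).map (fun p => min p.1 p.2)) ++
            (seg.drop (seg.length / 2)).drop (seg.length / 2))
          = f + 1 - bW seg := by
        rw [hbwf, hbws, hbw]
        omega
      rw [hfe]

-- ===== VERDICT (by name: the statement is the Claim_ definition above) =====
theorem sub_sort_py_spec : Claim_equal_sub_sort_py := by
  intro x up _ hpre
  unfold Spec_sub_sort_py sub_sort_py_alt
  rw [bLoop_cons x.length x (le_refl _) hpre (2 * x.length) [] [] up
      (by
        have h := List.length_pos_of_ne_nil hpre
        unfold bW
        split <;> omega),
    bLoop_nil, List.nil_append]
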